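-- pv_equiv track=rewrite | github.com/DeronJMartin/eightPiecePuzzle | 8p.py | swapUp
-- ===== SOURCE A (Python) =====
-- def swapUp(puzzleSize, node):
--     pS = node[0]
--     puzzleState = []
--     for i in range(puzzleSize):
--         puzzleState.append([])
--         for j in range(puzzleSize):
--             puzzleState[i].append(pS[i][j])
--
--     for i in range(puzzleSize):
--         for j in range(puzzleSize):
--             if (puzzleState[i][j] == 0):
--                 puzzleState[i][j] = puzzleState[i-1][j]
--                 puzzleState[i-1][j] = 0
--                 return(puzzleState)
-- ===== SOURCE B (Python) =====
-- def swapUp(puzzleSize, node):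
--     n = puzzleSize
--     pS = node[0]
--     flat = [pS[i][j] for i in range(n) for j in range(n)]
--     if 0 not in flat:
--         return None
--     k = flat.index(0)
--     flat[k] = flat[k - n]
--     flat[k - n] = 0
--     return [flat[i * n:(i + 1) * n] for i in range(n)]
-- ===== Notes on version B (the rewrite author's own statement) =====
-- stated objective: alternative
-- what changed: B replaces the 2-D copy-then-nested-scan with a flat 1-D representation: it flattens the n*n board into one list, finds the single index k of the blank, swaps flat[k] with flat[k-n] (one subtraction, with Python's negative indexing giving the same row-0 wraparound A's i-1 gives), and re-chunks the list into rows; A never leaves the 2-D structure and scans it with two nested loops.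
import Mathlib
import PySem

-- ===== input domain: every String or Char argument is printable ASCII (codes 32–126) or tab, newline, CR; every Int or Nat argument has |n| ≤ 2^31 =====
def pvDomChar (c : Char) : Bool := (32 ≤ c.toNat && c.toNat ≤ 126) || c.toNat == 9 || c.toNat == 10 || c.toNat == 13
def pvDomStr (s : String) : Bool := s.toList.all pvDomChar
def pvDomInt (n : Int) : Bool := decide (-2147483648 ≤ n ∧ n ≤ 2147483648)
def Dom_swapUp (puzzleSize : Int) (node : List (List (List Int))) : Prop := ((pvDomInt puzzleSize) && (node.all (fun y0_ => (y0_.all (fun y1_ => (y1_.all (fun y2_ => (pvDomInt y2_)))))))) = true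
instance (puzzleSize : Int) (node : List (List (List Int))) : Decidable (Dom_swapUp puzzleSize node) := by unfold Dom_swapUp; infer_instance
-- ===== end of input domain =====

-- B works on a flat 1-D list: it flattens the n×n board, finds the single flat index k of the
-- blank, swaps flat[k] with flat[k-n] (Python's negative indexing giving the same row-0 wraparound
-- as A's i-1), and re-chunks into rows; A copies and scans the 2-D structure with nested loops.
-- Same return value on Pre_; neither mutates `node`.

-- ===== PORT A =====
def pvCopyA (puzzleSize : Int) (pS : List (List Int)) : List (List Int) :=
  (PySem.List.pyRange 0 puzzleSize 1).foldl (fun st i =>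
    st ++ [(PySem.List.pyRange 0 puzzleSize 1).foldl
      (fun row j => row ++ [PySem.List.pyGetD (PySem.List.pyGetD pS i []) j 0]) []]) []

def pvScanColsA (n : Int) (st : List (List Int)) (i : Int) : List Int → Option (List (List Int))
  | [] => none
  | j :: js =>
    if PySem.List.pyGetD (PySem.List.pyGetD st i []) j 0 = 0 then
      let v := PySem.List.pyGetD (PySem.List.pyGetD st (i-1) []) j 0
      let st1 := PySem.List.pySetD st i (PySem.List.pySetD (PySem.List.pyGetD st i []) j v)
      some (PySem.List.pySetD st1 (i-1) (PySem.List.pySetD (PySem.List.pyGetD st1 (i-1) []) j 0))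
    else pvScanColsA n st i js

def pvScanRowsA (n : Int) (st : List (List Int)) : List Int → Option (List (List Int))
  | [] => none
  | i :: is =>
    match pvScanColsA n st i (PySem.List.pyRange 0 n 1) with
    | some res => some res
    | none => pvScanRowsA n st is

def swapUp (puzzleSize : Int) (node : List (List (List Int))) : Option (List (List Int)) :=
  match PySem.List.pyGet? node 0 with
  | none => none
  | some pS =>
    let puzzleState := pvCopyA puzzleSize pS
    pvScanRowsA puzzleSize puzzleState (PySem.List.pyRange 0 puzzleSize 1)

-- ===== PORT B =====
def swapUp_alt (puzzleSize : Int) (node : List (List (List Int))) : Option (List (List Int)) :=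
  match PySem.List.pyGet? node 0 with
  | none => none
  | some pS =>
    let flat := (PySem.List.pyRange 0 puzzleSize 1).flatMap (fun i =>
      (PySem.List.pyRange 0 puzzleSize 1).map (fun j =>
        PySem.List.pyGetD (PySem.List.pyGetD pS i []) j 0))
    match PySem.List.index? flat 0 with
    | none => none
    | some k =>
      let v := PySem.List.pyGetD flat ((k : Int) - puzzleSize) 0
      let flat1 := PySem.List.pySetD flat (k : Int) v
      let flat2 := PySem.List.pySetD flat1 ((k : Int) - puzzleSize) 0
      some ((PySem.List.pyRange 0 puzzleSize 1).map (fun i =>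
        PySem.List.slice flat2 (some (i * puzzleSize)) (some ((i + 1) * puzzleSize))))

-- ===== PRECONDITION & SPEC =====
-- Pre_ excludes exactly the inputs on which A raises IndexError: empty node (node[0]) and, for
-- positive puzzleSize, a first grid with fewer than puzzleSize rows or a too-short row among its
-- first puzzleSize rows (pS[i][j]).
def Pre_swapUp (puzzleSize : Int) (node : List (List (List Int))) : Prop :=
  node ≠ [] ∧ (0 < puzzleSize →
    puzzleSize ≤ (node.headI.length : Int) ∧
    ∀ row ∈ node.headI.take puzzleSize.toNat, puzzleSize ≤ (row.length : Int))
instance (puzzleSize : Int) (node : List (List (List Int))) : Decidable (Pre_swapUp puzzleSize node) := by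
  unfold Pre_swapUp; infer_instance

def pvWitness_swapUp : Int × List (List (List Int)) := (2, [[[1, 0], [2, 3]]])

def Spec_swapUp (puzzleSize : Int) (node : List (List (List Int))) (out : Option (List (List Int))) : Prop := out = swapUp_alt puzzleSize node
instance (puzzleSize : Int) (node : List (List (List Int))) (out : Option (List (List Int))) : Decidable (Spec_swapUp puzzleSize node out) := by unfold Spec_swapUp; infer_instance

-- ===== CLAIM (what is proved, stated in full; the proofs are below) =====
def Claim_equal_swapUp : Prop := ∀ (puzzleSize : Int) (node : List (List (List Int))), Dom_swapUp puzzleSize node → Pre_swapUp puzzleSize node → Spec_swapUp puzzleSize node (swapUp puzzleSize node)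

-- ===== LEMMAS AND PROOFS =====

def pvFindG : List (List Int) → Int → Option (Int × Int)
  | [], _ => none
  | row :: rest, s =>
    match PySem.List.index? row 0 with
    | some c => some (s, (c : Int))
    | none => pvFindG rest (s+1)

theorem pv_range_map_getD {α : Type} (xs : List α) (m : Nat) (d : α) (h : m ≤ xs.length) :
    (List.range m).map (fun i => xs.getD i d) = xs.take m := by
  apply List.ext_getElem
  · simp [h]
  · intro k h1 h2
    simp only [List.getElem_map, List.getElem_range, List.getElem_take]
    rw [List.getD_eq_getElem xs d (by simp at h1; omega)]

theorem pv_rows_eq (n : Int) (pS : List (List Int))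
    (h1 : n ≤ (pS.length : Int))
    (h2 : ∀ row ∈ pS.take n.toNat, n ≤ (row.length : Int)) :
    (PySem.List.pyRange 0 n 1).map (fun i =>
        (PySem.List.pyRange 0 n 1).map (fun j =>
          PySem.List.pyGetD (PySem.List.pyGetD pS i []) j 0))
      = (pS.take n.toNat).map (fun row => row.take n.toNat) := by
  simp only [PySem.List.pyRange_one, Int.sub_zero, List.map_map, Function.comp_def, zero_add]
  refine Eq.trans (List.map_congr_left (g := fun i : Nat => (pS.getD i []).take n.toNat) ?_) ?_
  · intro i hi
    simp only [List.mem_range] at hi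
    simp only [PySem.List.pyGetD_natCast]
    apply pv_range_map_getD
    have hmem : pS.getD i [] ∈ pS.take n.toNat := by
      rw [List.getD_eq_getElem pS [] (by omega)]
      have h3 : (pS.take n.toNat)[i]'(by simp; omega) = pS[i]'(by omega) := List.getElem_take
      rw [← h3]
      exact List.getElem_mem _
    have := h2 _ hmem
    omega
  · calc (List.range n.toNat).map (fun i : Nat => (pS.getD i []).take n.toNat)
        = ((List.range n.toNat).map (fun i => pS.getD i [])).map (fun row => row.take n.toNat) := by
          rw [List.map_map]; rfl
      _ = (pS.take n.toNat).map (fun row => row.take n.toNat) := by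
          rw [pv_range_map_getD pS n.toNat [] (by omega)]

theorem pv_copy_eq (n : Int) (pS : List (List Int))
    (h1 : n ≤ (pS.length : Int))
    (h2 : ∀ row ∈ pS.take n.toNat, n ≤ (row.length : Int)) :
    pvCopyA n pS = (pS.take n.toNat).map (fun row => row.take n.toNat) := by
  unfold pvCopyA
  rw [PySem.List.foldl_append_singleton_eq_map]
  rw [List.nil_append]
  rw [← pv_rows_eq n pS h1 h2]
  apply List.map_congr_left
  intro i _
  rw [PySem.List.foldl_append_singleton_eq_map, List.nil_append]

def pvEditA (G : List (List Int)) (i j : Int) : List (List Int) :=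
  let v := PySem.List.pyGetD (PySem.List.pyGetD G (i-1) []) j 0
  let st1 := PySem.List.pySetD G i (PySem.List.pySetD (PySem.List.pyGetD G i []) j v)
  PySem.List.pySetD st1 (i-1) (PySem.List.pySetD (PySem.List.pyGetD st1 (i-1) []) j 0)

def pvEditB (n : Int) (G : List (List Int)) (r c : Int) : List (List Int) :=
  let above := PySem.Int.mod (r - 1) n
  let v := PySem.List.pyGetD (PySem.List.pyGetD G above []) c 0
  let g1 := PySem.List.pySetD G r (PySem.List.pySetD (PySem.List.pyGetD G r []) c v)
  PySem.List.pySetD g1 above (PySem.List.pySetD (PySem.List.pyGetD g1 above []) c 0)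

theorem pv_pySetD_neg_one {α : Type} (xs : List α) (v : α) (h : xs ≠ []) :
    PySem.List.pySetD xs (-1) v = xs.set (xs.length - 1) v := by
  simp [PySem.List.pySetD, PySem.List.pySet?, PySem.List.pyIdx?]
  split_ifs with h1 <;> simp_all

theorem pv_pyGetD_neg_one' {α : Type} (xs : List α) (d : α) (h : xs ≠ []) :
    PySem.List.pyGetD xs (-1) d = xs.getD (xs.length - 1) d := by
  rw [PySem.List.pyGetD_neg_one xs d h, List.getLast_eq_getElem,
    List.getD_eq_getElem xs d (by have := List.length_pos_iff.mpr h; omega)]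

theorem pv_pySetD_neg {α : Type} (xs : List α) (k : Nat) (v : α)
    (h1 : 0 < k) (h2 : k ≤ xs.length) :
    PySem.List.pySetD xs (-(k : Int)) v = xs.set (xs.length - k) v := by
  simp [PySem.List.pySetD, PySem.List.pySet?, PySem.List.pyIdx?]
  split_ifs with h3 h4
  · omega
  · omega
  · simp

theorem pv_edit_eq (n : Int) (hn : 0 < n) (G : List (List Int)) (hG : (G.length : Int) = n)
    (r c : Nat) (hr : (r : Int) < n) :
    pvEditA G ↑r ↑c = pvEditB n G ↑r ↑c := by
  have hGne : G ≠ [] := by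
    cases G with
    | nil => simp at hG; omega
    | cons a l => simp
  have hGpos := List.length_pos_iff.mpr hGne
  by_cases h0 : r = 0
  · subst h0
    have hmod : PySem.Int.mod ((0:Int) - 1) n = n - 1 := by
      rw [PySem.Int.mod_eq_emod_of_pos hn]
      have e : (0:Int) - 1 = (n-1) + n * (-1) := by ring
      rw [e, Int.add_mul_emod_self_left]
      exact Int.emod_eq_of_lt (by omega) (by omega)
    unfold pvEditA pvEditB
    simp only [Nat.cast_zero]
    rw [hmod]
    have e1 : PySem.List.pyGetD G (n-1) [] = G.getD (G.length - 1) [] := by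
      rw [PySem.List.pyGetD_of_nonneg G [] (by omega)]
      congr 1
      omega
    have hz : (0:Int) - 1 = -1 := by ring
    rw [hz, pv_pyGetD_neg_one' G [] hGne, e1]
    set inner := PySem.List.pySetD (PySem.List.pyGetD G 0 []) (↑c)
        (PySem.List.pyGetD (G.getD (G.length - 1) []) (↑c) 0) with hinner
    have len1 : (PySem.List.pySetD G 0 inner).length = G.length :=
      PySem.List.length_pySetD G 0 inner
    have hne1 : PySem.List.pySetD G 0 inner ≠ [] := by
      rw [← List.length_pos_iff, len1]
      omega
    rw [pv_pyGetD_neg_one' _ _ hne1, pv_pySetD_neg_one _ _ hne1, len1]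
    rw [PySem.List.pySetD_of_nonneg _ _ (by omega : (0:Int) ≤ n - 1),
      PySem.List.pyGetD_of_nonneg _ _ (by omega : (0:Int) ≤ n - 1)]
    rw [show (n-1).toNat = G.length - 1 by omega]
  · have hmod : PySem.Int.mod (↑r - 1) n = ↑r - 1 := by
      rw [PySem.Int.mod_eq_emod_of_pos hn]
      exact Int.emod_eq_of_lt (by omega) (by omega)
    unfold pvEditA pvEditB
    rw [hmod]

theorem pv_cols_none (n : Int) (G : List (List Int)) (i : Int) (row : List Int)
    (hrow : PySem.List.pyGetD G i [] = row) (hlen : (row.length : Int) = n)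
    (hz : (0:Int) ∉ row) :
    ∀ js : List Int, (∀ j ∈ js, 0 ≤ j ∧ j < n) → pvScanColsA n G i js = none := by
  intro js
  induction js with
  | nil => intro _; rfl
  | cons j js ih =>
    intro hb
    obtain ⟨hj0, hjn⟩ := hb j (List.mem_cons_self)
    simp only [pvScanColsA]
    rw [hrow, PySem.List.pyGetD_eq_getElem row 0 hj0 (by omega)]
    rw [if_neg (fun hc => hz (by rw [← hc]; exact List.getElem_mem _))]
    exact ih (fun j hj => hb j (List.mem_cons_of_mem _ hj))

theorem pv_cols_some (n : Int) (G : List (List Int)) (i : Int) (row : List Int)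
    (hrow : PySem.List.pyGetD G i [] = row) (hlen : (row.length : Int) = n)
    (c : Nat) (hc : PySem.List.index? row 0 = some c) :
    ∀ (k j0 : Nat), c - j0 = k → j0 ≤ c →
      pvScanColsA n G i (PySem.List.pyRange (↑j0) n 1) = some (pvEditA G i ↑c) := by
  obtain ⟨hclen, hcval, hcmin⟩ := PySem.List.getElem_of_index?_eq_some hc
  intro k
  induction k with
  | zero =>
    intro j0 hk hle
    have hj0c : j0 = c := by omega
    subst hj0c
    rw [PySem.List.pyRange_one_cons (by omega : (↑j0:Int) < n)]
    simp only [pvScanColsA]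
    rw [hrow, PySem.List.pyGetD_eq_getElem row 0 (by omega) (by omega)]
    rw [if_pos (by simpa using hcval)]
    simp only [pvEditA, hrow]
  | succ k ih =>
    intro j0 hk hle
    have hj0c : j0 < c := by omega
    rw [PySem.List.pyRange_one_cons (by omega : (↑j0:Int) < n)]
    simp only [pvScanColsA]
    rw [hrow, PySem.List.pyGetD_eq_getElem row 0 (by omega) (by omega)]
    rw [if_neg (by simpa using hcmin j0 hj0c)]
    rw [show (↑j0 : Int) + 1 = ↑(j0 + 1) by push_cast; ring]
    exact ih (j0+1) (by omega) (by omega)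

theorem pv_rows (n : Int) (hn : 0 < n) (G : List (List Int)) (hG : (G.length : Int) = n)
    (hrows : ∀ row ∈ G, (row.length : Int) = n) :
    ∀ (k i0 : Nat), n.toNat - i0 = k →
      pvScanRowsA n G (PySem.List.pyRange (↑i0) n 1) =
        (match pvFindG (G.drop i0) ↑i0 with
         | none => none
         | some (r, c) => some (pvEditB n G r c)) := by
  intro k
  induction k with
  | zero =>
    intro i0 hk
    rw [PySem.List.pyRange_one]
    rw [show (n - ↑i0).toNat = 0 by omega]
    rw [List.drop_eq_nil_of_le (by omega : G.length ≤ i0)]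
    rfl
  | succ k ih =>
    intro i0 hk
    have hi0 : i0 < G.length := by omega
    have hrow : PySem.List.pyGetD G (↑i0) [] = G[i0] := by
      rw [PySem.List.pyGetD_eq_getElem G [] (by omega) (by omega)]
      simp
    have hlen : ((G[i0] : List Int).length : Int) = n := hrows _ (List.getElem_mem hi0)
    rw [PySem.List.pyRange_one_cons (by omega : (↑i0:Int) < n)]
    simp only [pvScanRowsA]
    rw [List.drop_eq_getElem_cons hi0]
    cases hidx : PySem.List.index? (G[i0] : List Int) 0 with
    | none =>
      rw [pv_cols_none n G (↑i0) G[i0] hrow hlen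
        ((PySem.List.index?_eq_none_iff _ _).mp hidx)
        (PySem.List.pyRange 0 n 1)
        (fun j hj => by rw [PySem.List.mem_pyRange_one] at hj; exact hj)]
      rw [show (↑i0 : Int) + 1 = ↑(i0 + 1) by push_cast; ring]
      rw [ih (i0+1) (by omega)]
      simp only [pvFindG, hidx]
      rw [show (↑(i0+1) : Int) = ↑i0 + 1 by push_cast; ring]
    | some c =>
      rw [show (0:Int) = ((0:Nat):Int) by simp]
      rw [pv_cols_some n G (↑i0) G[i0] hrow hlen c hidx c 0 (by omega) (by omega)]
      have hcn : (↑c : Int) < n := by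
        obtain ⟨hclen, -, -⟩ := PySem.List.getElem_of_index?_eq_some hidx
        omega
      rw [pv_edit_eq n hn G hG i0 c (by omega)]
      simp only [pvFindG, hidx]

-- B-side lemmas: the flat list is the flatten of the truncated grid, first-zero positions
-- correspond via div/mod, set/get on the flat list are 2-D set/get, and chunking recovers rows.

theorem pv_index?_append_of_not_mem (row t : List Int) (v : Int) (hv : v ∉ row) :
    PySem.List.index? (row ++ t) v = (PySem.List.index? t v).map (· + row.length) := by
  induction row with
  | nil => simp [Option.map_id']
  | cons x xs ih =>
    simp only [List.mem_cons, not_or] at hv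
    rw [List.cons_append, PySem.List.index?_cons_of_ne (xs ++ t) (Ne.symm hv.1),
      ih hv.2, Option.map_map]
    cases PySem.List.index? t v <;> simp [Function.comp_def]
    omega

theorem pv_find_flatten (m : Nat) (hm : 0 < m) :
    ∀ (G : List (List Int)) (s : Int), (∀ row ∈ G, row.length = m) →
      pvFindG G s = (PySem.List.index? G.flatten 0).map
        (fun k => (s + ((k / m : Nat) : Int), ((k % m : Nat) : Int))) := by
  intro G
  induction G with
  | nil =>
    intro s _
    simp [pvFindG, PySem.List.index?_eq_idxOf?]
  | cons row rest ih =>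
    intro s hrows
    have hrlen : row.length = m := hrows _ List.mem_cons_self
    simp only [pvFindG, List.flatten_cons]
    cases hidx : PySem.List.index? row 0 with
    | some c =>
      obtain ⟨hclen, -, -⟩ := PySem.List.getElem_of_index?_eq_some hidx
      rw [PySem.List.index?_append_of_mem _
        ((PySem.List.index?_isSome_iff row 0).mp (by rw [hidx]; rfl)), hidx]
      simp only [Option.map_some]
      have hc : c < m := by omega
      rw [Nat.div_eq_of_lt hc, Nat.mod_eq_of_lt hc]
      simp
    | none =>
      rw [pv_index?_append_of_not_mem row _ 0 ((PySem.List.index?_eq_none_iff _ _).mp hidx)]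
      rw [ih (s+1) (fun r hr => hrows _ (List.mem_cons_of_mem _ hr)), Option.map_map]
      cases PySem.List.index? rest.flatten 0 with
      | none => rfl
      | some k =>
        simp only [Option.map_some, Function.comp_def]
        rw [hrlen]
        have h1 : (k + m) / m = k / m + 1 := by
          rw [Nat.add_div_right _ hm]
        have h2 : (k + m) % m = k % m := by
          simp [Nat.add_mod_right]
        rw [h1, h2]
        congr 1
        push_cast
        ring

theorem pv_flatten_getD (m : Nat) :
    ∀ (G : List (List Int)) (r c : Nat) (d : Int), (∀ row ∈ G, row.length = m) →
      r < G.length → c < m →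
      (G.flatten).getD (r * m + c) d = (G.getD r []).getD c d := by
  intro G
  induction G with
  | nil => intro r c d _ hr _; simp at hr
  | cons row rest ih =>
    intro r c d hrows hr hc
    have hrlen : row.length = m := hrows _ List.mem_cons_self
    cases r with
    | zero =>
      simp only [List.flatten_cons, Nat.zero_mul, Nat.zero_add, List.getD_cons_zero]
      exact List.getD_append row rest.flatten d c (by omega)
    | succ r =>
      simp only [List.flatten_cons, List.getD_cons_succ]
      rw [show (r + 1) * m + c = row.length + (r * m + c) by rw [hrlen]; ring]
      rw [show row.length + (r * m + c) = r * m + c + row.length by ring]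
      simp only [List.getD, List.getElem?_append_right (by omega : row.length ≤ r * m + c + row.length)]
      rw [show r * m + c + row.length - row.length = r * m + c by omega]
      exact ih r c d (fun rr hrr => hrows _ (List.mem_cons_of_mem _ hrr)) (by simpa using hr) hc

theorem pv_flatten_set (m : Nat) :
    ∀ (G : List (List Int)) (r c : Nat) (v : Int), (∀ row ∈ G, row.length = m) →
      r < G.length → c < m →
      (G.flatten).set (r * m + c) v = (G.set r ((G.getD r []).set c v)).flatten := by
  intro G
  induction G with
  | nil => intro r c v _ hr _; simp at hr
  | cons row rest ih =>
    intro r c v hrows hr hc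
    have hrlen : row.length = m := hrows _ List.mem_cons_self
    cases r with
    | zero =>
      simp only [List.flatten_cons, Nat.zero_mul, Nat.zero_add, List.getD_cons_zero,
        List.set_cons_zero]
      rw [List.set_append, if_pos (by omega)]
    | succ r =>
      simp only [List.flatten_cons, List.getD_cons_succ, List.set_cons_succ]
      rw [List.set_append, if_neg (by rw [hrlen, Nat.succ_mul]; omega)]
      rw [show (r + 1) * m + c - row.length = r * m + c by rw [hrlen, Nat.succ_mul]; omega]
      rw [ih r c v (fun rr hrr => hrows _ (List.mem_cons_of_mem _ hrr)) (by simpa using hr) hc]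

theorem pv_drop_take_flatten (m : Nat) :
    ∀ (G : List (List Int)) (r : Nat), (∀ row ∈ G, row.length = m) → r < G.length →
      ((G.flatten).drop (r * m)).take m = G.getD r [] := by
  intro G
  induction G with
  | nil => intro r _ hr; simp at hr
  | cons row rest ih =>
    intro r hrows hr
    have hrlen : row.length = m := hrows _ List.mem_cons_self
    cases r with
    | zero =>
      simp only [List.flatten_cons, Nat.zero_mul, List.drop_zero, List.getD_cons_zero]
      rw [List.take_append, List.take_of_length_le (by omega), List.take_eq_nil_iff.mpr (by omega)]
      simp
    | succ r =>
      simp only [List.flatten_cons, List.getD_cons_succ]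
      rw [List.drop_append, List.drop_eq_nil_of_le (by rw [hrlen, Nat.succ_mul]; omega : row.length ≤ (r+1)*m),
        List.nil_append]
      rw [show (r + 1) * m - row.length = r * m by rw [hrlen, Nat.succ_mul]; omega]
      exact ih r (fun rr hrr => hrows _ (List.mem_cons_of_mem _ hrr)) (by simpa using hr)

theorem pv_length_flatten (m : Nat) (G : List (List Int))
    (hrows : ∀ row ∈ G, row.length = m) : G.flatten.length = G.length * m := by
  induction G with
  | nil => simp
  | cons row rest ih =>
    simp only [List.flatten_cons, List.length_append, List.length_cons]
    rw [hrows _ List.mem_cons_self, ih (fun r hr => hrows _ (List.mem_cons_of_mem _ hr))]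
    ring

theorem pv_chunk_flatten (m : Nat) (G : List (List Int))
    (hG : G.length = m) (hrows : ∀ row ∈ G, row.length = m) :
    (PySem.List.pyRange 0 (↑m) 1).map (fun i =>
        PySem.List.slice G.flatten (some (i * ↑m)) (some ((i + 1) * ↑m))) = G := by
  rw [PySem.List.pyRange_one]
  simp only [Int.sub_zero, List.map_map, Function.comp_def, zero_add, Int.toNat_natCast]
  have step : ∀ k ∈ List.range m,
      PySem.List.slice G.flatten (some ((↑k : Int) * ↑m)) (some ((↑k + 1) * ↑m))
        = G.getD k [] := by
    intro k hk
    simp only [List.mem_range] at hk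
    rw [show ((↑k : Int) * ↑m) = ((k * m : Nat) : Int) by push_cast; ring]
    rw [show ((↑k + 1) * (↑m : Int)) = ((k * m : Nat) : Int) + ((m : Nat) : Int) by push_cast; ring]
    rw [PySem.List.slice_natCast_add]
    exact pv_drop_take_flatten m G k hrows (by omega)
  rw [List.map_congr_left step]
  rw [pv_range_map_getD G m [] (by omega), List.take_of_length_le (by omega)]

-- ===== VERDICT (by name: the statement is the Claim_ definition above) =====
theorem swapUp_spec : Claim_equal_swapUp := by
  intro n node _ hpre
  obtain ⟨hne, hbounds⟩ := hpre
  obtain ⟨pS, rest, rfl⟩ : ∃ pS rest, node = pS :: rest := by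
    cases node with
    | nil => exact absurd rfl hne
    | cons a l => exact ⟨a, l, rfl⟩
  unfold Spec_swapUp
  simp only [swapUp, swapUp_alt, PySem.List.pyGet?_zero_cons]
  by_cases hn : 0 < n
  · obtain ⟨h1, h2⟩ := hbounds hn
    simp only [List.headI] at h1 h2
    set m := n.toNat
    have hnm : n = (m : Int) := by omega
    have hm0 : 0 < m := by omega
    set G := (pS.take m).map (fun row => row.take m) with hGdef
    have hGlen : G.length = m := by
      simp [hGdef]
      omega
    have hGrows : ∀ row ∈ G, row.length = m := by
      intro row hrow
      rw [hGdef] at hrow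
      simp only [List.mem_map] at hrow
      obtain ⟨r0, hr0, rfl⟩ := hrow
      have := h2 r0 hr0
      simp only [List.length_take]
      omega
    have hFlen : G.flatten.length = m * m := by
      rw [pv_length_flatten m G hGrows, hGlen]
    -- B-side: flat = G.flatten
    rw [List.flatMap_def, pv_rows_eq n pS h1 h2, ← hGdef]
    -- A-side normal form
    rw [show pvCopyA n pS = G from pv_copy_eq n pS h1 h2]
    have hA := pv_rows n hn G (by omega) (fun row hr => by rw [hGrows row hr]; omega)
      (n.toNat - 0) 0 rfl
    simp only [Nat.cast_zero, List.drop_zero] at hA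
    rw [hA]
    rw [pv_find_flatten m hm0 G 0 hGrows]
    cases hidx : PySem.List.index? G.flatten 0 with
    | none => rfl
    | some k =>
      simp only [Option.map_some, Int.zero_add]
      obtain ⟨hklen', -, -⟩ := PySem.List.getElem_of_index?_eq_some hidx
      have hklen : k < m * m := by rw [← hFlen]; exact hklen'
      obtain ⟨rN, cN, hrNe, hcNe⟩ : ∃ rN cN, k / m = rN ∧ k % m = cN := ⟨_, _, rfl, rfl⟩
      rw [hrNe, hcNe]
      have hkdec : rN * m + cN = k := by
        rw [← hrNe, ← hcNe, Nat.mul_comm]; exact Nat.div_add_mod k m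
      have hcNm : cN < m := by rw [← hcNe]; exact Nat.mod_lt _ hm0
      have hrNm : rN < m := by
        by_contra h
        have := Nat.mul_le_mul_right m (not_lt.mp h)
        omega
      have hmm : m ≤ m * m := Nat.le_mul_of_pos_left m hm0
      have hmrm : rN = 0 ∨ m ≤ rN * m := by
        by_cases hr0 : rN = 0
        · exact Or.inl hr0
        · exact Or.inr (le_trans (le_of_eq (Nat.one_mul m).symm)
            (Nat.mul_le_mul_right m (by omega)))
      -- the 'above' row index
      obtain ⟨aN, haN⟩ : ∃ a, (if rN = 0 then m - 1 else rN - 1) = a := ⟨_, rfl⟩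
      have haNm : aN < m := by rw [← haN]; split_ifs <;> omega
      have haNeq : aN * m + cN = (if rN = 0 then m * m - (m - k) else k - m) := by
        rw [← haN]
        split_ifs with hr0
        · have hkc : cN = k := by rw [← hkdec, hr0]; simp
          rw [Nat.sub_one_mul]
          omega
        · rcases hmrm with h | h
          · exact absurd h hr0
          · rw [Nat.sub_one_mul]
            omega
      -- B's flat-index accesses are nat accesses at aN*m+cN
      have hv : PySem.List.pyGetD G.flatten ((k : Int) - n) 0
          = (G.flatten).getD (aN * m + cN) 0 := by
        by_cases hr0 : rN = 0
        · have hkc : cN = k := by rw [← hkdec, hr0]; simp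
          have hkm : k < m := by omega
          rw [hnm, show ((k:Int) - (m:Int)) = -(((m - k : Nat)) : Int) by omega]
          rw [PySem.List.pyGetD_neg_natCast G.flatten (m - k) 0 (by omega)
            (by rw [hFlen]; omega)]
          rw [List.getD_eq_getElem _ 0 (by rw [hFlen, haNeq]; (split_ifs; omega))]
          congr 1
          rw [haNeq, if_pos hr0, hFlen]
        · have hmk : m ≤ k := by rcases hmrm with h | h; exact absurd h hr0; omega
          rw [hnm, show ((k:Int) - (m:Int)) = (((k - m : Nat)) : Int) by omega]
          rw [PySem.List.pyGetD_natCast]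
          congr 1
          rw [haNeq, if_neg hr0]
      set v := (G.flatten).getD (aN * m + cN) 0 with hvdef
      set flat1 := (G.flatten).set k v with hflat1
      have hflat1len : flat1.length = m * m := by rw [hflat1, List.length_set, hFlen]
      have hset1 : PySem.List.pySetD G.flatten (k : Int) v = flat1 := by
        rw [PySem.List.pySetD_natCast]
      have hset2 : PySem.List.pySetD flat1 ((k : Int) - n) 0
          = flat1.set (aN * m + cN) 0 := by
        by_cases hr0 : rN = 0
        · have hkc : cN = k := by rw [← hkdec, hr0]; simp
          have hkm : k < m := by omega
          rw [hnm, show ((k:Int) - (m:Int)) = -(((m - k : Nat)) : Int) by omega]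
          rw [pv_pySetD_neg flat1 (m - k) 0 (by omega) (by rw [hflat1len]; omega)]
          congr 1
          rw [haNeq, if_pos hr0, hflat1len]
        · have hmk : m ≤ k := by rcases hmrm with h | h; exact absurd h hr0; omega
          rw [hnm, show ((k:Int) - (m:Int)) = (((k - m : Nat)) : Int) by omega]
          rw [PySem.List.pySetD_natCast]
          congr 1
          rw [haNeq, if_neg hr0]
      rw [hv, hset1, hset2]
      -- 2-D forms of the two flat sets
      set G1 := G.set rN ((G.getD rN []).set cN v) with hG1
      have hG1len : G1.length = m := by rw [hG1, List.length_set, hGlen]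
      have hG1rows : ∀ row ∈ G1, row.length = m := by
        intro row hrow
        rw [hG1] at hrow
        rcases List.mem_or_eq_of_mem_set hrow with h | h
        · exact hGrows row h
        · rw [h, List.length_set]
          have : G.getD rN [] ∈ G := by
            rw [List.getD_eq_getElem G [] (by omega)]
            exact List.getElem_mem _
          exact hGrows _ this
      have hflat1G1 : flat1 = G1.flatten := by
        rw [hflat1, ← hkdec, pv_flatten_set m G rN cN v hGrows (by omega) hcNm]
      set G2 := G1.set aN ((G1.getD aN []).set cN 0) with hG2
      have hG2len : G2.length = m := by rw [hG2, List.length_set, hG1len]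
      have hG2rows : ∀ row ∈ G2, row.length = m := by
        intro row hrow
        rw [hG2] at hrow
        rcases List.mem_or_eq_of_mem_set hrow with h | h
        · exact hG1rows row h
        · rw [h, List.length_set]
          have : G1.getD aN [] ∈ G1 := by
            rw [List.getD_eq_getElem G1 [] (by omega)]
            exact List.getElem_mem _
          exact hG1rows _ this
      have hflat2G2 : flat1.set (aN * m + cN) 0 = G2.flatten := by
        rw [hflat1G1, pv_flatten_set m G1 aN cN 0 hG1rows (by omega) hcNm, ← hG2]
      rw [hflat2G2, hnm, pv_chunk_flatten m G2 hG2len hG2rows]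
      -- A's 2-D edit equals G2
      congr 1
      unfold pvEditB
      have hmod : PySem.Int.mod ((rN : Int) - 1) ((m : Nat) : Int) = (aN : Int) := by
        have hmpos : (0:Int) < ((m : Nat) : Int) := by omega
        by_cases hr0 : rN = 0
        · rw [hr0]
          rw [PySem.Int.mod_eq_emod_of_pos hmpos]
          have e : ((0:Nat):Int) - 1 = (((m:Nat):Int)-1) + ((m:Nat):Int) * (-1) := by ring
          rw [e, Int.add_mul_emod_self_left, Int.emod_eq_of_lt (by omega) (by omega)]
          rw [← haN, if_pos hr0]
          omega
        · rw [PySem.Int.mod_eq_emod_of_pos hmpos, Int.emod_eq_of_lt (by omega) (by omega)]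
          rw [← haN, if_neg hr0]
          omega
      rw [hmod]
      simp only [PySem.List.pyGetD_natCast, PySem.List.pySetD_natCast]
      rw [← pv_flatten_getD m G aN cN 0 hGrows (by omega) hcNm]
  · rw [PySem.List.pyRange_one_eq_nil (by omega : n ≤ 0)]
    rfl
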